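-- pv_equiv track=rewrite | github.com/tsonika/CID-miRNA | utils.py | generateRNACombinations
-- ===== SOURCE A (Python) =====
-- def generateRNACombinations(length):
--     """
--     Generate all sequences of ACGU length long
--     """
--     if length == 0:
--         return []
--
--     sequences = ['A', 'C', 'U', 'G']
--
--     for _ in range(2, length+1):
--         new_sequences = []
--         for sequence in sequences:
--             new_sequences.extend('%s%s' % (sequence, base) for base in 'ACUG')
--         sequences = new_sequences
--
--     return sequences
-- ===== SOURCE B (Python) =====
-- def generateRNACombinations(length):
--     if length == 0:
--         return []
--     if length <= 1:
--         return ['A', 'C', 'U', 'G']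
--     return [s + b for s in generateRNACombinations(length - 1) for b in 'ACUG']
-- ===== Notes on version B (the rewrite author's own statement) =====
-- stated objective: simpler
-- what changed: Replaces A's iterative loop that repeatedly rebuilds an accumulator list via extend with a direct recursive decomposition: the sequences of length n are the sequences of length n-1, each extended by one base in a single comprehension.
import Mathlib
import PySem

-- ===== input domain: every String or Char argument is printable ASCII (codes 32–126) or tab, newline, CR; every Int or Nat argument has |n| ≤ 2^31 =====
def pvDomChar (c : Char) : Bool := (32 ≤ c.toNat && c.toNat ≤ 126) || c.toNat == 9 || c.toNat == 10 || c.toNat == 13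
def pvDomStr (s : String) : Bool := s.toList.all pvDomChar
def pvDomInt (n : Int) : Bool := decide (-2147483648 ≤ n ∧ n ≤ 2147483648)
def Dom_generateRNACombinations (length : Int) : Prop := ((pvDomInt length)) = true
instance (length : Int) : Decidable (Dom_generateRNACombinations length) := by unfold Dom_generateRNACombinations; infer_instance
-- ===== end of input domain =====

-- B replaces A's iterative repeated-extension loop with a recursive decomposition (simpler).

-- ===== PORT A =====
def rnaBasesA : List Char := ['A', 'C', 'U', 'G']

def generateRNACombinations (length : Int) : List String :=
  if length = 0 then []
  else
    (PySem.List.pyRange 2 (length + 1) 1).foldl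
      (fun sequences _ =>
        sequences.foldl
          (fun new_sequences sequence =>
            new_sequences ++ rnaBasesA.map (fun base => sequence.push base))
          [])
      ["A", "C", "U", "G"]

-- ===== PORT B =====
def rnaBasesB : List Char := ['A', 'C', 'U', 'G']

-- recursion of Source B on length ≥ 1, on the Nat distance to the base case
def genRNARec : Nat → List String
  | 0 => ["A", "C", "U", "G"]
  | 1 => ["A", "C", "U", "G"]
  | n + 2 => (genRNARec (n + 1)).flatMap (fun s => rnaBasesB.map (fun b => s.push b))

def generateRNACombinations_alt (length : Int) : List String :=
  if length = 0 then []
  else if length ≤ 1 then ["A", "C", "U", "G"]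
  else genRNARec length.toNat

-- ===== PRECONDITION & SPEC =====
def Spec_generateRNACombinations (length : Int) (out : List String) : Prop := out = generateRNACombinations_alt length
instance (length : Int) (out : List String) : Decidable (Spec_generateRNACombinations length out) := by unfold Spec_generateRNACombinations; infer_instance

-- ===== CLAIM (what is proved, stated in full; the proofs are below) =====
def Claim_equal_generateRNACombinations : Prop := ∀ (length : Int), Dom_generateRNACombinations length → Spec_generateRNACombinations length (generateRNACombinations length)

-- ===== LEMMAS AND PROOFS =====

-- one step of A's loop
def rnaStep (seqs : List String) : List String :=
  seqs.foldl (fun acc s => acc ++ rnaBasesA.map (fun b => s.push b)) []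

lemma rnaStep_eq_flatMap (seqs : List String) :
    rnaStep seqs = seqs.flatMap (fun s => rnaBasesA.map (fun b => s.push b)) := by
  unfold rnaStep
  suffices h : ∀ (l : List String) (acc : List String),
      l.foldl (fun acc s => acc ++ rnaBasesA.map (fun b => s.push b)) acc
        = acc ++ l.flatMap (fun s => rnaBasesA.map (fun b => s.push b)) by
    simpa only [List.nil_append] using h seqs []
  intro l
  induction l with
  | nil => simp
  | cons x xs ih => intro acc; simp [ih]

lemma foldl_const_step (l : List Int) (init : List String) :
    l.foldl (fun s _ => rnaStep s) init = rnaStep^[l.length] init := by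
  induction l generalizing init with
  | nil => rfl
  | cons x xs ih => simp [List.foldl_cons, ih, Function.iterate_succ_apply]

lemma genRNARec_eq_iterate (n : Nat) :
    genRNARec (n + 1) = rnaStep^[n] ["A", "C", "U", "G"] := by
  induction n with
  | zero => rfl
  | succ n ih =>
    show (genRNARec (n + 1)).flatMap (fun s => rnaBasesB.map (fun b => s.push b))
        = rnaStep^[n + 1] ["A", "C", "U", "G"]
    rw [show rnaBasesB = rnaBasesA from rfl, ← rnaStep_eq_flatMap, ih,
      Function.iterate_succ_apply']

-- ===== VERDICT (by name: the statement is the Claim_ definition above) =====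
theorem generateRNACombinations_spec : Claim_equal_generateRNACombinations := by
  intro length _
  unfold Spec_generateRNACombinations generateRNACombinations generateRNACombinations_alt
  by_cases hz : length = 0
  · simp [hz]
  · rw [if_neg hz, if_neg hz]
    by_cases h1 : length ≤ 1
    · rw [if_pos h1, PySem.List.pyRange_one_eq_nil (by omega : length + 1 ≤ 2)]
      rfl
    · rw [if_neg h1]
      have hfold : (PySem.List.pyRange 2 (length + 1) 1).foldl
          (fun sequences _ =>
            sequences.foldl
              (fun new_sequences sequence =>
                new_sequences ++ rnaBasesA.map (fun base => sequence.push base))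
              [])
          ["A", "C", "U", "G"]
          = rnaStep^[(length - 1).toNat] ["A", "C", "U", "G"] := by
        rw [show (fun (sequences : List String) (_ : Int) =>
            sequences.foldl
              (fun new_sequences sequence =>
                new_sequences ++ rnaBasesA.map (fun base => sequence.push base))
              []) = (fun s _ => rnaStep s) from rfl]
        rw [foldl_const_step, PySem.List.length_pyRange_one]
        congr 1
        omega
      rw [hfold]
      obtain ⟨n, hn⟩ : ∃ n : Nat, length.toNat = n + 1 :=
        ⟨length.toNat - 1, by omega⟩
      rw [hn, genRNARec_eq_iterate]
      congr 1
      omega
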